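-- pv_equiv track=rewrite | github.com/OpenDaL/ingestion-and-transformation | packages/metadata_ingestion/metadata_ingestion/translators.py | tkey2fname
-- ===== SOURCE A (Python) =====
-- def tkey2fname(tkey):
--     """
--     Translates a key in the new metadata schema to a function name
--
--     Arguments:
--         tkey --- str: The key name in the new metadata scheme
--
--     Returns:
--         str --- The function name for translation
--     """
--     previous_is_upper = False
--     new_str_data = []
--     if tkey == 'type':
--         return 'type_'
--     for l in tkey:
--         if l.isupper():
--             if previous_is_upper:
--                 new_str_data[-1] = new_str_data[-1].replace('_', '').upper()
--                 new_str_data.append(l)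
--             else:
--                 new_str_data.append('_{}'.format(l.lower()))
--             previous_is_upper = True
--         else:
--             new_str_data.append(l)
--             previous_is_upper = False
--
--     return ''.join(new_str_data)
-- ===== SOURCE B (Python) =====
-- def tkey2fname(tkey):
--     """Run-based rewrite: scan maximal runs of same isupper() class with two
--     pointers; a length-1 uppercase run becomes '_" + lowercase, any other run is
--     copied unchanged."""
--     if tkey == 'type':
--         return 'type_'
--     out = []
--     i = 0
--     n = len(tkey)
--     while i < n:
--         j = i + 1
--         while j < n and tkey[j].isupper() == tkey[i].isupper():
--             j += 1
--         run = tkey[i:j]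
--         if tkey[i].isupper() and j - i == 1:
--             out.append('_' + run.lower())
--         else:
--             out.append(run)
--         i = j
--     return ''.join(out)
-- ===== Notes on version B (the rewrite author's own statement) =====
-- stated objective: simpler
-- what changed: Replaced the per-character loop that back-patches the previously appended piece with a two-pointer scan over maximal runs of equal isupper() class, emitting each run in one step ('_'+lower for a length-1 uppercase run, the run verbatim otherwise).
import Mathlib
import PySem

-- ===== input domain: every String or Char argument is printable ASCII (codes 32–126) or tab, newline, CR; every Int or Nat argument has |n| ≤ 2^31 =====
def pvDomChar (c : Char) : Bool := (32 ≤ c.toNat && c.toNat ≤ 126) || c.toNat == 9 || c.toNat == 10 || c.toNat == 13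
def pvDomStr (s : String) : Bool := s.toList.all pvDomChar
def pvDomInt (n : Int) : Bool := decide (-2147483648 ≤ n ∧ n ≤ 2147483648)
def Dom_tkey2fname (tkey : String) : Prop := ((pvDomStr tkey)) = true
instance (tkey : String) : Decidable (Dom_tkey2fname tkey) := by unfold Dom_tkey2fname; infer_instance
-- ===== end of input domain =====

-- B replaces A's per-character loop with last-element back-patching by a single
-- two-pointer scan over maximal runs of equal isupper() class (objective: simpler).
-- Character classification/case mapping via PySem.Chars: exact on the ASCII domain.

-- ===== PORT A =====
-- new_str_data[-1] = new_str_data[-1].replace('_', '').upper()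
def pvPatch (h : List Char) : List Char :=
  PySem.Chars.upper (PySem.Chars.replace h ['_'] [])

-- the body of A's for-loop; new_str_data is kept in reverse (head = last appended piece)
def pvAStep (st : Bool × List (List Char)) (l : Char) : Bool × List (List Char) :=
  if PySem.Chars.isupper l then
    if st.1 then
      (true, [l] :: (match st.2 with
        | h :: t => pvPatch h :: t
        | [] => []))
    else
      (true, ['_', PySem.Chars.lowerChar l] :: st.2)
  else
    (false, [l] :: st.2)

def tkey2fname (tkey : String) : String :=
  if tkey = "type" then "type_"
  else
    let st := tkey.toList.foldl pvAStep (false, [])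
    String.mk st.2.reverse.flatten

-- ===== PORT B =====
-- the outer while-loop of Source B: peel off one maximal run of same isupper() class per step
def pvBGo (cs : List Char) : List Char :=
  match cs with
  | [] => []
  | c :: rest =>
    let run := c :: rest.takeWhile (fun d => PySem.Chars.isupper d == PySem.Chars.isupper c)
    let rest' := rest.dropWhile (fun d => PySem.Chars.isupper d == PySem.Chars.isupper c)
    (if PySem.Chars.isupper c && run.length == 1
       then ['_', PySem.Chars.lowerChar c]
       else run) ++ pvBGo rest'
termination_by cs.length
decreasing_by
  have := List.length_dropWhile_le (fun d => PySem.Chars.isupper d == PySem.Chars.isupper c) rest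
  simp only [List.length_cons]
  omega

def tkey2fname_alt (tkey : String) : String :=
  if tkey = "type" then "type_"
  else String.mk (pvBGo tkey.toList)

-- ===== PRECONDITION & SPEC =====
def Spec_tkey2fname (tkey : String) (out : String) : Prop := out = tkey2fname_alt tkey
instance (tkey : String) (out : String) : Decidable (Spec_tkey2fname tkey out) := by unfold Spec_tkey2fname; infer_instance

-- ===== CLAIM (what is proved, stated in full; the proofs are below) =====
def Claim_equal_tkey2fname : Prop := ∀ (tkey : String), Dom_tkey2fname tkey → Spec_tkey2fname tkey (tkey2fname tkey)

-- ===== LEMMAS AND PROOFS =====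

theorem pvUpBounds (c : Char) (h : PySem.Chars.isupper c = true) :
    65 ≤ c.toNat ∧ c.toNat ≤ 90 := by
  simp [PySem.Chars.isupper, Char.le_def] at h; exact h

theorem pvIslowerFalse (c : Char) (h : PySem.Chars.isupper c = true) :
    PySem.Chars.islower c = false := by
  have h' := pvUpBounds c h
  simp only [Char.toNat] at h'
  simp [PySem.Chars.islower, Char.le_def]
  intro hc
  simp only [UInt32.le_iff_toNat_le, UInt32.lt_iff_toNat_lt, UInt32.toNat_ofNat] at hc ⊢
  omega

theorem pvUpperChar_id (c : Char) (h : PySem.Chars.isupper c = true) :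
    PySem.Chars.upperChar c = c := by
  unfold PySem.Chars.upperChar
  rw [pvIslowerFalse c h]
  simp

theorem pvLower_toNat (c : Char) (h : PySem.Chars.isupper c = true) :
    (PySem.Chars.lowerChar c).toNat = c.toNat + 32 := by
  have h' := pvUpBounds c h
  unfold PySem.Chars.lowerChar
  rw [if_pos h, Char.toNat_ofNat, if_pos (Or.inl (by omega))]

theorem pvUpperChar_lowerChar (c : Char) (h : PySem.Chars.isupper c = true) :
    PySem.Chars.upperChar (PySem.Chars.lowerChar c) = c := by
  have h' := pvUpBounds c h
  have ht := pvLower_toNat c h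
  unfold PySem.Chars.upperChar
  rw [if_pos ?low]
  case low =>
    simp [PySem.Chars.islower, Char.le_def]
    simp only [UInt32.le_iff_toNat_le, UInt32.toNat_ofNat]
    have : (PySem.Chars.lowerChar c).val.toNat = c.toNat + 32 := ht
    constructor <;> (rw [this]; simp; omega)
  rw [ht]
  have : c.toNat + 32 - 32 = c.toNat := by omega
  rw [this, Char.ofNat_toNat]

theorem pvUp_ne_underscore (c : Char) (h : PySem.Chars.isupper c = true) : c ≠ '_' := by
  have h' := pvUpBounds c h
  intro e; subst e; revert h'; decide

theorem pvLower_ne_underscore (c : Char) (h : PySem.Chars.isupper c = true) :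
    PySem.Chars.lowerChar c ≠ '_' := by
  have h' := pvUpBounds c h
  have ht := pvLower_toNat c h
  intro e
  rw [e] at ht
  have h95 : ('_').toNat = 95 := rfl
  omega

theorem pvPatch_single (c : Char) (h : PySem.Chars.isupper c = true) : pvPatch [c] = [c] := by
  unfold pvPatch
  have hne := pvUp_ne_underscore c h
  have : PySem.Chars.replace [c] ['_'] [] = [c] := by
    simp [PySem.Chars.replace, PySem.Chars.replace.go, List.isPrefixOf]
    exact fun e => absurd e.symm hne
  rw [this]
  simp [PySem.Chars.upper, pvUpperChar_id c h]

theorem pvPatch_pair (c : Char) (h : PySem.Chars.isupper c = true) :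
    pvPatch ['_', PySem.Chars.lowerChar c] = [c] := by
  unfold pvPatch
  have hne := pvLower_ne_underscore c h
  have : PySem.Chars.replace ['_', PySem.Chars.lowerChar c] ['_'] [] = [PySem.Chars.lowerChar c] := by
    simp [PySem.Chars.replace, PySem.Chars.replace.go, List.isPrefixOf]
    exact fun e => absurd e.symm hne
  rw [this]
  simp [PySem.Chars.upper, pvUpperChar_lowerChar c h]

theorem pvStep_low (st : Bool × List (List Char)) (c : Char)
    (h : PySem.Chars.isupper c = false) : pvAStep st c = (false, [c] :: st.2) := by
  simp [pvAStep, h]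

theorem pvStep_up_false (acc : List (List Char)) (c : Char)
    (h : PySem.Chars.isupper c = true) :
    pvAStep (false, acc) c = (true, ['_', PySem.Chars.lowerChar c] :: acc) := by
  simp [pvAStep, h]

theorem pvStep_up_true (hd : List Char) (tl : List (List Char)) (c : Char)
    (h : PySem.Chars.isupper c = true) :
    pvAStep (true, hd :: tl) c = (true, [c] :: pvPatch hd :: tl) := by
  simp [pvAStep, h]

theorem pvFold_low (l : List Char) (b : Bool) (acc : List (List Char))
    (h : ∀ c ∈ l, PySem.Chars.isupper c = false) :
    l.foldl pvAStep (b, acc) =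
      (if l.isEmpty then b else false, l.reverse.map (fun c => [c]) ++ acc) := by
  induction l generalizing b acc with
  | nil => simp
  | cons c t ih =>
    have hc := h c (by simp)
    rw [List.foldl_cons, pvStep_low (b, acc) c hc,
        ih false ([c] :: acc) (fun d hd => h d (by simp [hd]))]
    simp

theorem pvFold_upcont (l : List Char) (x : Char) (acc : List (List Char))
    (hl : ∀ c ∈ l, PySem.Chars.isupper c = true) (hx : PySem.Chars.isupper x = true) :
    l.foldl pvAStep (true, [x] :: acc) = (true, l.reverse.map (fun c => [c]) ++ [x] :: acc) := by
  induction l generalizing x acc with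
  | nil => simp
  | cons c t ih =>
    have hc := hl c (by simp)
    rw [List.foldl_cons, pvStep_up_true [x] acc c hc, pvPatch_single x hx,
        ih c ([x] :: acc) (fun d hd => hl d (by simp [hd])) hc]
    simp

theorem pvFold_up (l : List Char) (c : Char) (acc : List (List Char))
    (hc : PySem.Chars.isupper c = true) (hl : ∀ d ∈ l, PySem.Chars.isupper d = true) :
    (c :: l).foldl pvAStep (false, acc) =
      (true, if l.isEmpty then ['_', PySem.Chars.lowerChar c] :: acc
             else l.reverse.map (fun d => [d]) ++ [c] :: acc) := by
  rw [List.foldl_cons, pvStep_up_false acc c hc]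
  cases l with
  | nil => simp
  | cons d t =>
    have hd := hl d (by simp)
    rw [List.foldl_cons, pvStep_up_true _ acc d hd, pvPatch_pair c hc,
        pvFold_upcont t d ([c] :: acc) (fun e he => hl e (by simp [he])) hd]
    simp

theorem pvFold_bdry (d : Char) (t : List Char) (acc : List (List Char))
    (hd : PySem.Chars.isupper d = false) :
    (d :: t).foldl pvAStep (true, acc) = (d :: t).foldl pvAStep (false, acc) := by
  rw [List.foldl_cons, List.foldl_cons, pvStep_low (true, acc) d hd, pvStep_low (false, acc) d hd]

theorem pvFlattenSingles (l : List Char) : (l.map (fun c => [c])).flatten = l := by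
  induction l with
  | nil => rfl
  | cons c t ih => simp [ih]

theorem pvMain : ∀ (n : Nat) (cs : List Char), cs.length = n → ∀ (acc : List (List Char)),
    (cs.foldl pvAStep (false, acc)).2.reverse.flatten = acc.reverse.flatten ++ pvBGo cs := by
  intro n
  induction n using Nat.strong_induction_on with
  | _ n ih =>
    intro cs hlen acc
    cases cs with
    | nil => simp [pvBGo]
    | cons c rest =>
      rw [pvBGo]
      set p := fun d => PySem.Chars.isupper d == PySem.Chars.isupper c with hp
      have hsplit : c :: rest = (c :: rest.takeWhile p) ++ rest.dropWhile p := by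
        simp [List.takeWhile_append_dropWhile]
      have hlen' : (rest.dropWhile p).length < n := by
        have := List.length_dropWhile_le p rest
        simp only [List.length_cons] at hlen
        omega
      have hcont : ∀ (A1 : List (List Char)),
          ((rest.dropWhile p).foldl pvAStep (false, A1)).2.reverse.flatten
            = A1.reverse.flatten ++ pvBGo (rest.dropWhile p) :=
        fun A1 => ih _ hlen' (rest.dropWhile p) rfl A1
      by_cases hu : PySem.Chars.isupper c = true
      · have htake : ∀ d ∈ rest.takeWhile p, PySem.Chars.isupper d = true := by
          intro d hd
          have := List.mem_takeWhile_imp hd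
          rw [hp] at this; simp [hu] at this; exact this
        have hbd : ∀ (A1 : List (List Char)),
            ((rest.dropWhile p).foldl pvAStep (true, A1)).2
              = ((rest.dropWhile p).foldl pvAStep (false, A1)).2 := by
          intro A1
          cases hr : rest.dropWhile p with
          | nil => rfl
          | cons d t =>
            have hdp : p d = false := by
              have := List.head_dropWhile_not p (l := rest) (by simp [hr])
              simpa [hr] using this
            have hdu : PySem.Chars.isupper d = false := by
              rw [hp] at hdp; simp [hu] at hdp; exact hdp
            rw [pvFold_bdry d t A1 hdu]
        rw [hsplit, List.foldl_append,
            pvFold_up (rest.takeWhile p) c acc hu htake]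
        cases hte : rest.takeWhile p with
        | nil =>
          simp only [List.isEmpty_nil, if_true]
          rw [hbd, hcont]
          simp [hu]
        | cons e te =>
          simp only [List.isEmpty_cons, Bool.false_eq_true, if_false]
          rw [hbd, hcont]
          rw [show (PySem.Chars.isupper c && ((c :: e :: te).length == 1)) = false by simp]
          simp only [Bool.false_eq_true, if_false]
          rw [← hte]
          simp [pvFlattenSingles, List.map_reverse]
      · have hul : PySem.Chars.isupper c = false := by simpa using hu
        have htake : ∀ d ∈ c :: rest.takeWhile p, PySem.Chars.isupper d = false := by
          intro d hd
          rcases List.mem_cons.mp hd with h | h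
          · subst h; exact hul
          · have := List.mem_takeWhile_imp h
            rw [hp] at this; simp [hul] at this; exact this
        rw [hsplit, List.foldl_append,
            pvFold_low (c :: rest.takeWhile p) false acc htake]
        simp only [ite_self]
        rw [hcont]
        rw [show (PySem.Chars.isupper c && (((c :: rest.takeWhile p) : List Char).length == 1)) = false by simp [hul]]
        simp only [Bool.false_eq_true, if_false]
        simp [pvFlattenSingles, List.map_reverse]

-- ===== VERDICT (by name: the statement is the Claim_ definition above) =====
theorem tkey2fname_spec : Claim_equal_tkey2fname := by
  intro tkey _
  unfold Spec_tkey2fname tkey2fname tkey2fname_alt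
  by_cases h : tkey = "type" <;> simp [h]
  have := pvMain tkey.toList.length tkey.toList rfl []
  simp only [List.reverse_nil, List.flatten_nil, List.nil_append] at this
  rw [this]
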